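-- pv_equiv track=rewrite | github.com/agigante80/VPNSentinel | vpn_sentinel_common/network.py | parse_dns_trace
-- ===== SOURCE A (Python) =====
-- from typing import Dict
--
-- def parse_dns_trace(trace_text: str) -> Dict[str, str]:
--     """Parse DNS trace response from Cloudflare whoami service.
--
--     Handles both formats:
--     - Single line: "fl=... ip=... loc=XX colo=YYY ..."
--     - Multi-line: loc=XX\ncolo=YYY
--     """
--     out = {"loc": "", "colo": ""}
--     if not trace_text:
--         return out
--
--     # Remove quotes if present (Cloudflare returns quoted string)
--     trace_text = trace_text.strip('"')
--
--     # Try to parse as space-separated key=value pairs (Cloudflare format)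
--     for pair in trace_text.split():
--         if '=' in pair:
--             key, value = pair.split('=', 1)
--             if key == 'loc':
--                 out['loc'] = value
--             elif key == 'colo':
--                 out['colo'] = value
--
--     # Also check line-by-line format (legacy compatibility)
--     if not out['loc'] and not out['colo']:
--         for line in trace_text.splitlines():
--             if line.startswith("loc="):
--                 out["loc"] = line.split("=", 1)[1]
--             elif line.startswith("colo="):
--                 out["colo"] = line.split("=", 1)[1]
--
--     return out
-- ===== SOURCE B (Python) =====
-- def _last_match(parts, prefix):
--     """Value of the last element of parts starting with prefix, or ""."""
--     for p in reversed(parts):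
--         if p.startswith(prefix):
--             return p[len(prefix):]
--     return ""
--
--
-- def parse_dns_trace(trace_text: str):
--     if not trace_text:
--         return {"loc": "", "colo": ""}
--     t = trace_text.strip('"')
--     tokens = t.split()
--     loc = _last_match(tokens, "loc=")
--     colo = _last_match(tokens, "colo=")
--     if not loc and not colo:
--         lines = t.splitlines()
--         loc = _last_match(lines, "loc=")
--         colo = _last_match(lines, "colo=")
--     return {"loc": loc, "colo": colo}
-- ===== Notes on version B (the rewrite author's own statement) =====
-- stated objective: simpler
-- what changed: Replaces A's single stateful forward loop that mutates a dict via if/elif key dispatch with a shared prefix-extraction helper: one backwards scan per key with early exit returning the value of the last matching token, reused unchanged for the line-based fallback pass.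
import Mathlib
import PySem

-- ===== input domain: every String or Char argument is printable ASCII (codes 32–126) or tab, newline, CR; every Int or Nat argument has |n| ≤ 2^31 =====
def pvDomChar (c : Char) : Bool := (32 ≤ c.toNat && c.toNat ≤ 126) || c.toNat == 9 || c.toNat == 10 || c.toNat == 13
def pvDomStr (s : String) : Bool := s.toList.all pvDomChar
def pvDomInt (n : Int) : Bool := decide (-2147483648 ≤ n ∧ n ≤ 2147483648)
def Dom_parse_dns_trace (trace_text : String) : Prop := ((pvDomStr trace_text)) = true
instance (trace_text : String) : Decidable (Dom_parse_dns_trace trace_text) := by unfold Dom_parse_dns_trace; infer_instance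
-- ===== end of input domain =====

-- B replaces A's stateful forward loop over a mutated dict (if/elif key dispatch) by one shared
-- prefix-extraction helper (backwards scan with early exit per key), reused for the fallback pass;
-- objective: simpler.  Equivalence is about the return value (A mutates only its local dict).

-- ===== PORT A =====
def parse_dns_trace (trace_text : String) : List (String × String) :=
  let out : PySem.Dict String String := PySem.Dict.ofList [("loc", ""), ("colo", "")]
  if trace_text = "" then out.items else
  let t := PySem.Str.stripChars trace_text "\""
  let out := (PySem.Str.split₀ t).foldl (fun out pair =>
    if PySem.Str.isIn "=" pair then
      -- key, value = pair.split('=', 1): the '=' guard guarantees exactly two pieces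
      match PySem.Str.splitMax? pair "=" 1 with
      | some (key :: value :: _) =>
        if key = "loc" then out.insert "loc" value
        else if key = "colo" then out.insert "colo" value
        else out
      | _ => out
    else out) out
  let out :=
    -- out['loc'] / out['colo']: both keys are always present, so getD is the exact lookup
    if out.getD "loc" "" = "" ∧ out.getD "colo" "" = "" then
      (PySem.Str.splitlines t).foldl (fun out line =>
        if PySem.Str.startswith line "loc=" then
          -- line.split("=", 1)[1]: startswith guarantees the index-1 piece exists
          out.insert "loc" (match PySem.Str.splitMax? line "=" 1 with
            | some (_ :: v :: _) => v
            | _ => "")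
        else if PySem.Str.startswith line "colo=" then
          out.insert "colo" (match PySem.Str.splitMax? line "=" 1 with
            | some (_ :: v :: _) => v
            | _ => "")
        else out) out
    else out
  out.items

-- ===== PORT B =====
-- for p in reversed(parts): if p.startswith(prefix): return p[len(prefix):]  /  return ""
def lastMatchGo (pre : String) : List String → String
  | [] => ""
  | p :: rest =>
    if PySem.Str.startswith p pre then PySem.Str.slice p (some (pre.length : Int)) none
    else lastMatchGo pre rest

def lastMatch (parts : List String) (pre : String) : String := lastMatchGo pre parts.reverse

def parse_dns_trace_alt (trace_text : String) : List (String × String) :=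
  if trace_text = "" then [("loc", ""), ("colo", "")] else
  let t := PySem.Str.stripChars trace_text "\""
  let tokens := PySem.Str.split₀ t
  let loc := lastMatch tokens "loc="
  let colo := lastMatch tokens "colo="
  let (loc, colo) :=
    if loc = "" ∧ colo = "" then
      let lines := PySem.Str.splitlines t
      (lastMatch lines "loc=", lastMatch lines "colo=")
    else (loc, colo)
  [("loc", loc), ("colo", colo)]

-- ===== PRECONDITION & SPEC =====
def Spec_parse_dns_trace (trace_text : String) (out : List (String × String)) : Prop := out = parse_dns_trace_alt trace_text
instance (trace_text : String) (out : List (String × String)) : Decidable (Spec_parse_dns_trace trace_text out) := by unfold Spec_parse_dns_trace; infer_instance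

-- ===== CLAIM (what is proved, stated in full; the proofs are below) =====
def Claim_equal_parse_dns_trace : Prop := ∀ (trace_text : String), Dom_parse_dns_trace trace_text → Spec_parse_dns_trace trace_text (parse_dns_trace trace_text)

-- ===== LEMMAS AND PROOFS =====

-- abbreviations used only by the proofs
def pvVal (n : Int) (p : String) : String := PySem.Str.slice p (some n) none
def pvSw (p pre : String) : Bool := PySem.Str.startswith p pre
def pvStepB (out : PySem.Dict String String) (p : String) : PySem.Dict String String :=
  if pvSw p "loc=" then out.insert "loc" (pvVal 4 p)
  else if pvSw p "colo=" then out.insert "colo" (pvVal 5 p)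
  else out
def pvD (a b : String) : PySem.Dict String String := PySem.Dict.ofList [("loc", a), ("colo", b)]
def pvKfold (pre : String) (n : Int) (ts : List String) (init : String) : String :=
  ts.foldl (fun acc p => if pvSw p pre then pvVal n p else acc) init

theorem pv_if_true {α : Type} (t e : α) : (if (true = true) then t else e) = t := rfl
theorem pv_if_false {α : Type} (t e : α) : (if (false = true) then t else e) = e := rfl

-- splitting behaviour of s.split('=', 1)
theorem pv_go_m0 (fuel : Nat) (l : List Char) (acc : List (List Char)) :
    PySem.Chars.splitOnMax.go ['='] fuel 0 l [] acc = (l :: acc).reverse := by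
  cases fuel <;> cases l <;> simp [PySem.Chars.splitOnMax.go]

theorem pv_go_m1 (s : List Char) : ∀ (fuel : Nat), s.length < fuel → ∀ (cur : List Char) (acc : List (List Char)),
    PySem.Chars.splitOnMax.go ['='] fuel 1 s cur acc =
      acc.reverse ++ (if '=' ∈ s then [cur.reverse ++ s.takeWhile (· ≠ '='), (s.dropWhile (· ≠ '=')).tail]
                      else [cur.reverse ++ s]) := by
  induction s with
  | nil =>
    intro fuel hf cur acc
    cases fuel with
    | zero => omega
    | succ f => simp [PySem.Chars.splitOnMax.go]
  | cons c rest ih =>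
    intro fuel hf cur acc
    cases fuel with
    | zero => omega
    | succ f =>
      by_cases hc : c = '='
      · subst hc
        have hpre : (['='].isPrefixOf ('=' :: rest)) = true := by simp [List.isPrefixOf]
        simp only [PySem.Chars.splitOnMax.go, hpre, if_neg (by omega : ¬ (1:Nat) = 0), if_true]
        rw [pv_go_m0]
        simp [List.takeWhile, List.dropWhile]
      · have hc2 : ¬ '=' = c := fun h => hc h.symm
        have hpre : (['='].isPrefixOf (c :: rest)) = false := by
          simp [List.isPrefixOf]
          exact hc2
        simp only [PySem.Chars.splitOnMax.go, hpre, if_neg (by omega : ¬ (1:Nat) = 0),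
          Bool.false_eq_true, if_false]
        rw [ih f (by simp at hf; omega) (c :: cur) acc]
        by_cases hm : '=' ∈ rest
        · simp [List.takeWhile_cons, List.dropWhile_cons, hc, hc2, hm, List.mem_cons]
        · simp [List.takeWhile_cons, List.dropWhile_cons, hc, hc2, hm, List.mem_cons]

theorem pv_splitMax_eq (p : List Char) :
    PySem.Chars.splitOnMax p ['='] 1 =
      if '=' ∈ p then [p.takeWhile (· ≠ '='), (p.dropWhile (· ≠ '=')).tail] else [p] := by
  unfold PySem.Chars.splitOnMax
  rw [if_neg (by omega : ¬ (1:Int) < 0)]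
  rw [show (1:Int).toNat = 1 from rfl]
  rw [pv_go_m1 p (p.length + 1) (by omega) [] []]
  simp

theorem pv_tw_dw (k t : List Char) (hk : '=' ∉ k) :
    (k ++ '=' :: t).takeWhile (· ≠ '=') = k ∧ (k ++ '=' :: t).dropWhile (· ≠ '=') = '=' :: t := by
  induction k with
  | nil => simp [List.takeWhile, List.dropWhile]
  | cons c rest ih =>
    have hc : c ≠ '=' := fun h => hk (by simp [h])
    obtain ⟨h21, h22⟩ := ih (fun h => hk (by simp [h]))
    simp only [ne_eq, decide_not] at h21 h22 ⊢
    simp [List.takeWhile_cons, List.dropWhile_cons, hc, h21, h22]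

theorem pv_dw_first (l : List Char) (hm : '=' ∈ l) :
    ∃ t, l.dropWhile (· ≠ '=') = '=' :: t := by
  induction l with
  | nil => simp at hm
  | cons c rest ih =>
    by_cases hc : c = '='
    · subst hc
      exact ⟨rest, by simp [List.dropWhile_cons]⟩
    · have hc2 : ¬ '=' = c := fun h => hc h.symm
      have hm' : '=' ∈ rest := by
        rcases List.mem_cons.mp hm with h | h
        · exact absurd h hc2
        · exact h
      obtain ⟨t, ht⟩ := ih hm'
      refine ⟨t, ?_⟩
      simp only [ne_eq, decide_not] at ht ⊢
      simp [List.dropWhile_cons, hc, ht]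

theorem pv_key_char (p k : List Char) (hk : '=' ∉ k) :
    (('=' ∈ p) ∧ p.takeWhile (· ≠ '=') = k) ↔ (k ++ ['=']) <+: p := by
  constructor
  · rintro ⟨hmem, htw⟩
    obtain ⟨t, ht⟩ := pv_dw_first p hmem
    refine ⟨t, ?_⟩
    have hsplit := List.takeWhile_append_dropWhile (p := fun c => decide (c ≠ '=')) (l := p)
    rw [← hsplit, htw, ht]
    simp
  · rintro ⟨t, ht⟩
    have h2 := pv_tw_dw k t hk
    have ht' : k ++ '=' :: t = p := by rw [← ht]; simp
    subst ht'
    refine ⟨by simp, h2.1⟩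

theorem pv_after_char (p k : List Char) (hk : '=' ∉ k) (h : (k ++ ['=']) <+: p) :
    (p.dropWhile (· ≠ '=')).tail = p.drop (k.length + 1) := by
  obtain ⟨t, ht⟩ := h
  have ht' : k ++ '=' :: t = p := by rw [← ht]; simp
  subst ht'
  rw [(pv_tw_dw k t hk).2]
  rw [show k ++ '=' :: t = (k ++ ['=']) ++ t by simp,
    show k.length + 1 = (k ++ ['=']).length by simp, List.drop_left]
  rfl

-- bridge facts about the String-level primitives
theorem pv_sw_iff (p pre : String) : pvSw p pre = true ↔ pre.toList <+: p.toList := by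
  rw [pvSw, PySem.Str.startswith_eq, PySem.Chars.startswith_iff]

theorem pv_isIn_iff (p : String) : PySem.Str.isIn "=" p = true ↔ '=' ∈ p.toList := by
  rw [PySem.Str.isIn_iff_infix]
  constructor
  · intro h
    exact h.subset (by simp [show ("=" : String).toList = ['='] from rfl])
  · intro h
    obtain ⟨s, t, ht⟩ := List.append_of_mem h
    exact ⟨s, t, by rw [ht]; simp [show ("=" : String).toList = ['='] from rfl]⟩

theorem pv_ofList_eq_iff (l : List Char) (s : String) :
    String.ofList l = s ↔ l = s.toList := by
  rw [← String.toList_inj, String.toList_ofList]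

theorem pv_split_str (p : String) (hmem : '=' ∈ p.toList) :
    PySem.Str.splitMax? p "=" 1 =
      some [String.ofList (p.toList.takeWhile (· ≠ '=')),
            String.ofList ((p.toList.dropWhile (· ≠ '=')).tail)] := by
  rw [PySem.Str.splitMax?, PySem.Chars.splitMax?]
  rw [show ("=" : String).toList = ['='] from rfl]
  rw [if_neg (by simp)]
  rw [pv_splitMax_eq, if_pos hmem]
  rfl

theorem pv_val_eq (p : String) (k : List Char) (hk : '=' ∉ k) (h : (k ++ ['=']) <+: p.toList) :
    String.ofList ((p.toList.dropWhile (· ≠ '=')).tail)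
      = PySem.Str.slice p (some ((k.length + 1 : Nat) : Int)) none := by
  apply String.toList_inj.mp
  rw [String.toList_ofList, PySem.Str.toList_slice, PySem.Chars.slice_eq_listSlice,
    PySem.List.slice_from_natCast]
  exact pv_after_char p.toList k hk h

-- a prefix test cannot succeed for both keys
theorem pv_sw_not_both (p : String) (h : pvSw p "loc=" = true) : pvSw p "colo=" = false := by
  cases hc : pvSw p "colo=" with
  | false => rfl
  | true =>
    exfalso
    obtain ⟨t1, e1⟩ := (pv_sw_iff p "loc=").mp h
    obtain ⟨t2, e2⟩ := (pv_sw_iff p "colo=").mp hc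
    rw [← e1] at e2
    rw [show ("loc=" : String).toList = ['l','o','c','='] from rfl,
        show ("colo=" : String).toList = ['c','o','l','o','='] from rfl] at e2
    simp only [List.cons_append, List.cons.injEq] at e2
    exact absurd e2.1 (by decide)

-- A's token dispatch (split at the first '=' and compare the key) is B's prefix dispatch
theorem pv_key_iff (p : String) (k : List Char) (hk : '=' ∉ k) (pre : String)
    (hpre : pre.toList = k ++ ['=']) (hmem : '=' ∈ p.toList) :
    (String.ofList (p.toList.takeWhile (· ≠ '=')) = String.ofList k) ↔ pvSw p pre = true := by
  rw [pv_ofList_eq_iff, String.toList_ofList, pv_sw_iff, hpre]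
  rw [← pv_key_char p.toList k hk]
  constructor
  · exact fun h => ⟨hmem, h⟩
  · exact fun h => h.2

theorem pv_stepA_eq (out : PySem.Dict String String) (p : String) :
    (if PySem.Str.isIn "=" p then
       match PySem.Str.splitMax? p "=" 1 with
       | some (key :: value :: _) =>
         if key = "loc" then out.insert "loc" value
         else if key = "colo" then out.insert "colo" value
         else out
       | _ => out
     else out)
    = pvStepB out p := by
  by_cases hin : PySem.Str.isIn "=" p = true
  · have hmem : '=' ∈ p.toList := (pv_isIn_iff p).mp hin
    rw [hin, pv_if_true, pv_split_str p hmem]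
    have hlocS : ("loc" : String) = String.ofList ['l','o','c'] := by
      rw [pv_ofList_eq_iff]
      exact String.toList_ofList.symm
    have hcoloS : ("colo" : String) = String.ofList ['c','o','l','o'] := by
      rw [pv_ofList_eq_iff]
      exact String.toList_ofList.symm
    rw [pvStepB]
    by_cases hl : pvSw p "loc=" = true
    · have hkey : String.ofList (p.toList.takeWhile (· ≠ '=')) = String.ofList ['l','o','c'] :=
        (pv_key_iff p ['l','o','c'] (by decide) "loc=" rfl hmem).mpr hl
      rw [hl, pv_if_true]
      show (if String.ofList (p.toList.takeWhile (· ≠ '=')) = "loc" then _ else _) = _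
      rw [hlocS, if_pos hkey]
      have hp : (['l','o','c'] ++ ['=']) <+: p.toList := by
        have := (pv_sw_iff p "loc=").mp hl
        simpa [show ("loc=" : String).toList = ['l','o','c','='] from rfl] using this
      rw [pv_val_eq p ['l','o','c'] (by decide) hp]
      rfl
    · have hkey : ¬ String.ofList (p.toList.takeWhile (· ≠ '=')) = String.ofList ['l','o','c'] := by
        intro h
        exact hl ((pv_key_iff p ['l','o','c'] (by decide) "loc=" rfl hmem).mp h)
      have hl' : pvSw p "loc=" = false := by simpa using hl
      rw [hl', pv_if_false]
      show (if String.ofList (p.toList.takeWhile (· ≠ '=')) = "loc" then _ else _) = _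
      rw [hlocS, if_neg hkey]
      by_cases hco : pvSw p "colo=" = true
      · have hkey2 : String.ofList (p.toList.takeWhile (· ≠ '=')) = String.ofList ['c','o','l','o'] :=
          (pv_key_iff p ['c','o','l','o'] (by decide) "colo=" rfl hmem).mpr hco
        rw [hcoloS, if_pos hkey2, hco, pv_if_true]
        have hp : (['c','o','l','o'] ++ ['=']) <+: p.toList := by
          have := (pv_sw_iff p "colo=").mp hco
          simpa [show ("colo=" : String).toList = ['c','o','l','o','='] from rfl] using this
        rw [pv_val_eq p ['c','o','l','o'] (by decide) hp]
        rfl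
      · have hkey2 : ¬ String.ofList (p.toList.takeWhile (· ≠ '=')) = String.ofList ['c','o','l','o'] := by
          intro h
          exact hco ((pv_key_iff p ['c','o','l','o'] (by decide) "colo=" rfl hmem).mp h)
        have hco' : pvSw p "colo=" = false := by simpa using hco
        rw [hcoloS, if_neg hkey2, hco', pv_if_false]
  · have hin' : PySem.Str.isIn "=" p = false := by simpa using hin
    have hmem : '=' ∉ p.toList := fun h => hin ((pv_isIn_iff p).mpr h)
    have hl : pvSw p "loc=" = false := by
      cases hsw : pvSw p "loc=" with
      | false => rfl
      | true =>
        exfalso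
        have := (pv_sw_iff p "loc=").mp hsw
        exact hmem (this.subset (by simp [show ("loc=" : String).toList = ['l','o','c','='] from rfl]))
    have hco : pvSw p "colo=" = false := by
      cases hsw : pvSw p "colo=" with
      | false => rfl
      | true =>
        exfalso
        have := (pv_sw_iff p "colo=").mp hsw
        exact hmem (this.subset (by simp [show ("colo=" : String).toList = ['c','o','l','o','='] from rfl]))
    rw [hin', pv_if_false, pvStepB, hl, hco]
    simp

-- the fallback's line value under the prefix guard
theorem pv_lineVal_eq (p : String) (k : List Char) (hk : '=' ∉ k) (pre : String)
    (hpre : pre.toList = k ++ ['=']) (h : pvSw p pre = true) :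
    (match PySem.Str.splitMax? p "=" 1 with
     | some (_ :: v :: _) => v
     | _ => "") = PySem.Str.slice p (some ((k.length + 1 : Nat) : Int)) none := by
  have hp : (k ++ ['=']) <+: p.toList := by
    have := (pv_sw_iff p pre).mp h
    rwa [hpre] at this
  have hmem : '=' ∈ p.toList := hp.subset (by simp)
  rw [pv_split_str p hmem]
  exact pv_val_eq p k hk hp

theorem pv_stepF_eq (out : PySem.Dict String String) (p : String) :
    (if PySem.Str.startswith p "loc=" then
       out.insert "loc" (match PySem.Str.splitMax? p "=" 1 with
         | some (_ :: v :: _) => v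
         | _ => "")
     else if PySem.Str.startswith p "colo=" then
       out.insert "colo" (match PySem.Str.splitMax? p "=" 1 with
         | some (_ :: v :: _) => v
         | _ => "")
     else out)
    = pvStepB out p := by
  rw [pvStepB]
  by_cases hl : pvSw p "loc=" = true
  · rw [show PySem.Str.startswith p "loc=" = pvSw p "loc=" from rfl, hl, pv_if_true, pv_if_true]
    rw [pv_lineVal_eq p ['l','o','c'] (by decide) "loc=" rfl hl]
    rfl
  · have hl' : pvSw p "loc=" = false := by simpa using hl
    rw [show PySem.Str.startswith p "loc=" = pvSw p "loc=" from rfl, hl', pv_if_false, pv_if_false]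
    by_cases hco : pvSw p "colo=" = true
    · rw [show PySem.Str.startswith p "colo=" = pvSw p "colo=" from rfl, hco, pv_if_true, pv_if_true]
      rw [pv_lineVal_eq p ['c','o','l','o'] (by decide) "colo=" rfl hco]
      rfl
    · have hco' : pvSw p "colo=" = false := by simpa using hco
      rw [show PySem.Str.startswith p "colo=" = pvSw p "colo=" from rfl, hco', pv_if_false, pv_if_false]

-- dict facts (keys "loc"/"colo" are always present, inserts overwrite in place)
theorem pv_dict_insert_loc (a b v : String) : (pvD a b).insert "loc" v = pvD v b := rfl
theorem pv_dict_insert_colo (a b v : String) : (pvD a b).insert "colo" v = pvD a v := rfl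
theorem pv_dict_getD_loc (a b : String) : (pvD a b).getD "loc" "" = a := rfl
theorem pv_dict_getD_colo (a b : String) : (pvD a b).getD "colo" "" = b := rfl
theorem pv_dict_items (a b : String) : (pvD a b).items = [("loc", a), ("colo", b)] := rfl

theorem pv_fold_dict (ts : List String) : ∀ (a b : String),
    ts.foldl pvStepB (pvD a b) =
      pvD (pvKfold "loc=" 4 ts a) (pvKfold "colo=" 5 ts b) := by
  induction ts with
  | nil => intro a b; rfl
  | cons p rest ih =>
    intro a b
    simp only [List.foldl_cons, pvKfold] at *
    show rest.foldl pvStepB (pvStepB (pvD a b) p) = _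
    rw [pvStepB]
    by_cases h1 : pvSw p "loc=" = true
    · have h2 := pv_sw_not_both p h1
      rw [h1, pv_if_true, pv_dict_insert_loc, ih]
      simp [pvKfold, h1, h2]
    · have h1' : pvSw p "loc=" = false := by simpa using h1
      by_cases h2 : pvSw p "colo=" = true
      · rw [h1', pv_if_false, h2, pv_if_true, pv_dict_insert_colo, ih]
        simp [pvKfold, h1', h2]
      · have h2' : pvSw p "colo=" = false := by simpa using h2
        rw [h1', pv_if_false, h2', pv_if_false, ih]
        simp [pvKfold, h1', h2']

-- a pvKfold is B's reversed scan
theorem pv_lastMatchGo_none (pre : String) (l : List String)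
    (h : ∀ p ∈ l, pvSw p pre = false) : lastMatchGo pre l = "" := by
  induction l with
  | nil => rfl
  | cons p rest ih =>
    rw [lastMatchGo, show PySem.Str.startswith p pre = pvSw p pre from rfl, h p (by simp)]
    simp only [Bool.false_eq_true, if_false]
    exact ih (fun q hq => h q (by simp [hq]))

theorem pv_lastMatchGo_append (pre : String) (l1 l2 : List String) :
    lastMatchGo pre (l1 ++ l2) =
      if l1.any (fun p => pvSw p pre) then lastMatchGo pre l1 else lastMatchGo pre l2 := by
  induction l1 with
  | nil => simp
  | cons p rest ih =>
    rw [List.cons_append, lastMatchGo, lastMatchGo,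
      show PySem.Str.startswith p pre = pvSw p pre from rfl]
    by_cases h : pvSw p pre = true
    · simp [h]
    · have h' : pvSw p pre = false := by simpa using h
      simp only [h', Bool.false_eq_true, if_false, List.any_cons, Bool.false_or]
      exact ih

theorem pv_kfold_eq (pre : String) (ts : List String) : ∀ (init : String),
    pvKfold pre ((pre.length : Int)) ts init =
      if ts.any (fun p => pvSw p pre) then lastMatchGo pre ts.reverse else init := by
  induction ts with
  | nil => intro init; simp [pvKfold]
  | cons p rest ih =>
    intro init
    simp only [pvKfold, List.foldl_cons, List.any_cons, List.reverse_cons]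
    rw [show rest.foldl (fun acc q => if pvSw q pre then pvVal (pre.length : Int) q else acc)
          (if pvSw p pre then pvVal (pre.length : Int) p else init) =
        pvKfold pre ((pre.length : Int)) rest (if pvSw p pre then pvVal (pre.length : Int) p else init) from rfl]
    rw [ih, pv_lastMatchGo_append]
    rw [List.any_reverse]
    by_cases hr : rest.any (fun q => pvSw q pre) = true
    · simp [hr]
    · have hr' : rest.any (fun q => pvSw q pre) = false := by simpa using hr
      simp only [hr', Bool.false_eq_true, if_false, Bool.or_false]
      rw [lastMatchGo, lastMatchGo, show PySem.Str.startswith p pre = pvSw p pre from rfl]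
      show _ = if pvSw p pre then (if pvSw p pre then pvVal (pre.length : Int) p else "") else init
      split_ifs <;> rfl

theorem pv_kfold_lastMatch (pre : String) (ts : List String) :
    pvKfold pre ((pre.length : Int)) ts "" = lastMatch ts pre := by
  rw [pv_kfold_eq, lastMatch]
  by_cases h : ts.any (fun p => pvSw p pre) = true
  · simp [h]
  · have h' : ts.any (fun p => pvSw p pre) = false := by simpa using h
    rw [if_neg (by simp [h'])]
    rw [pv_lastMatchGo_none pre ts.reverse]
    intro p hp
    have := List.any_eq_false.mp h' p (by simpa using hp)
    simpa using this

theorem pv_kfold_loc (ts : List String) : pvKfold "loc=" 4 ts "" = lastMatch ts "loc=" :=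
  pv_kfold_lastMatch "loc=" ts
theorem pv_kfold_colo (ts : List String) : pvKfold "colo=" 5 ts "" = lastMatch ts "colo=" :=
  pv_kfold_lastMatch "colo=" ts

-- ===== VERDICT (by name: the statement is the Claim_ definition above) =====
theorem parse_dns_trace_spec : Claim_equal_parse_dns_trace := by
  intro trace_text _
  unfold Spec_parse_dns_trace parse_dns_trace parse_dns_trace_alt
  by_cases h0 : trace_text = ""
  · rw [if_pos h0, if_pos h0]
    exact pv_dict_items "" ""
  · rw [if_neg h0, if_neg h0]
    simp only [pv_stepA_eq, pv_stepF_eq]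
    rw [show PySem.Dict.ofList [("loc", ""), ("colo", "")] = pvD "" "" from rfl]
    rw [pv_fold_dict, pv_dict_getD_loc, pv_dict_getD_colo, pv_kfold_loc, pv_kfold_colo]
    set t := PySem.Str.stripChars trace_text "\"" with ht
    set ts := PySem.Str.split₀ t with hts
    by_cases hc : lastMatch ts "loc=" = "" ∧ lastMatch ts "colo=" = ""
    · rw [if_pos hc, if_pos hc, hc.1, hc.2]
      rw [pv_fold_dict, pv_kfold_loc, pv_kfold_colo, pv_dict_items]
    · rw [if_neg hc, if_neg hc, pv_dict_items]
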